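-- pv_equiv track=rewrite | github.com/VITAMIN-organisation/vitamin-model-checker | model_checker/algorithms/explicit/CTL/preimage.py | _build_reverse_index
-- ===== SOURCE A (Python) =====
-- from typing import Any, Dict, List, Optional, Set, Tuple
--
-- def _build_reverse_index(
--     transitions: List[Tuple[Any, Any]],
-- ) -> Dict[str, Set[str]]:
--     """Build reverse index: target -> set of source states."""
--     reverse_index: Dict[str, Set[str]] = {}
--     for source, target in transitions:
--         target_str = str(target)
--         if target_str not in reverse_index:
--             reverse_index[target_str] = set()
--         reverse_index[target_str].add(str(source))
--     return reverse_index
-- ===== SOURCE B (Python) =====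
-- def _build_reverse_index(transitions):
--     """Build reverse index: target -> set of source states.
--
--     Two-pass decomposition: first collect the distinct targets in order of
--     first appearance, then for each target scan the transitions once,
--     collecting the set of its sources.
--     """
--     targets = []
--     for _source, target in transitions:
--         ts = str(target)
--         if ts not in targets:
--             targets.append(ts)
--     result = {}
--     for ts in targets:
--         sources = set()
--         for source, target in transitions:
--             if str(target) == ts:
--                 sources.add(str(source))
--         result[ts] = sources
--     return result
-- ===== Notes on version B (the rewrite author's own statement) =====
-- stated objective: alternative
-- what changed: Replaces A's single online hashing pass (create-empty-set-then-add per transition) by a two-pass grouping: first dedup the targets in first-appearance order, then one scan per target collecting its source set, assembling the dict one complete key at a time.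
import Mathlib
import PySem

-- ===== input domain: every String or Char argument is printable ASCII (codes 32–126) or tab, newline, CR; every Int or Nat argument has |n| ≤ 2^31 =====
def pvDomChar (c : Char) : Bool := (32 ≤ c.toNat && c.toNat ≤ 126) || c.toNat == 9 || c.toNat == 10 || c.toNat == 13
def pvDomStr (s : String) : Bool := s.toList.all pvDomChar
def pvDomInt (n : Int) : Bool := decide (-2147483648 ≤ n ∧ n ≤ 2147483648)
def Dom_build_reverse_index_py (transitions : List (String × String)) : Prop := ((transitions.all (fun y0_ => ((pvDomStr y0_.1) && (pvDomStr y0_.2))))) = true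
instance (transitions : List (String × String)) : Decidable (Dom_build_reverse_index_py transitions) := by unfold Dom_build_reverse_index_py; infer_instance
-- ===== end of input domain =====

-- B replaces A's single online hashing pass by a two-pass grouping (dedup targets, then one
-- scan per target collecting its source set); alternative decomposition, same return value.


-- ===== PORT A =====
-- for source, target in transitions: if target not in d: d[target] = set(); d[target].add(source)
def build_reverse_index_py (transitions : List (String × String)) : List (String × List String) :=
  (transitions.foldl
    (fun (d : PySem.Dict String (PySem.Set String)) st =>
      let d' := if d.contains st.2 then d else d.insert st.2 PySem.Set.empty
      d'.modify st.2 PySem.Set.empty (fun s => PySem.Set.add s st.1))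
    PySem.Dict.empty).items

-- ===== PORT B =====
-- pass 1: distinct targets in first-appearance order; pass 2: per target, scan for its sources
def build_reverse_index_py_alt (transitions : List (String × String)) : List (String × List String) :=
  let targets : PySem.Set String :=
    transitions.foldl (fun acc st => PySem.Set.add acc st.2) PySem.Set.empty
  let result : PySem.Dict String (PySem.Set String) :=
    targets.foldl
      (fun d ts =>
        d.insert ts
          (transitions.foldl
            (fun srcs st => if st.2 == ts then PySem.Set.add srcs st.1 else srcs)
            PySem.Set.empty))
      PySem.Dict.empty
  result.items

-- ===== PRECONDITION & SPEC =====
def Spec_build_reverse_index_py (transitions : List (String × String)) (out : List (String × List String)) : Prop := out = build_reverse_index_py_alt transitions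
instance (transitions : List (String × String)) (out : List (String × List String)) : Decidable (Spec_build_reverse_index_py transitions out) := by unfold Spec_build_reverse_index_py; infer_instance

-- ===== CLAIM (what is proved, stated in full; the proofs are below) =====
def Claim_equal_build_reverse_index_py : Prop := ∀ (transitions : List (String × String)), Dom_build_reverse_index_py transitions → Spec_build_reverse_index_py transitions (build_reverse_index_py transitions)

-- ===== LEMMAS AND PROOFS =====

-- The value A's dict holds at key t is exactly B's per-target scan (started from d's value at t).
theorem A_getD (l : List (String × String)) (d : PySem.Dict String (PySem.Set String)) (t : String) :
    (l.foldl
      (fun (d : PySem.Dict String (PySem.Set String)) st =>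
        let d' := if d.contains st.2 then d else d.insert st.2 PySem.Set.empty
        d'.modify st.2 PySem.Set.empty (fun s => PySem.Set.add s st.1)) d).getD t PySem.Set.empty
    = l.foldl (fun srcs st => if st.2 == t then PySem.Set.add srcs st.1 else srcs)
        (d.getD t PySem.Set.empty) := by
  induction l generalizing d with
  | nil => rfl
  | cons p l ih =>
      simp only [List.foldl_cons, ih]
      congr 1
      by_cases ht : p.2 = t
      · subst ht
        by_cases hc : d.contains p.2
        · simp [hc, PySem.Dict.getD_modify_self]
        · simp [hc, PySem.Dict.getD_modify_self, PySem.Dict.getD_insert_self,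
            PySem.Dict.getD_of_not_contains _ _ (by simpa using hc), PySem.Set.add,
            PySem.Set.contains]
      · have hne : t ≠ p.2 := fun h => ht h.symm
        by_cases hc : d.contains p.2
        · simp [hc, PySem.Dict.getD_modify_of_ne _ _ _ hne, if_neg (by simpa using ht)]
        · simp [hc, PySem.Dict.getD_modify_of_ne _ _ _ hne,
            PySem.Dict.getD_insert_of_ne _ _ _ hne, if_neg (by simpa using ht)]

-- A's key list is d's keys updated with the targets, in first-appearance order.
theorem A_keys (l : List (String × String)) (d : PySem.Dict String (PySem.Set String)) :
    (l.foldl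
      (fun (d : PySem.Dict String (PySem.Set String)) st =>
        let d' := if d.contains st.2 then d else d.insert st.2 PySem.Set.empty
        d'.modify st.2 PySem.Set.empty (fun s => PySem.Set.add s st.1)) d).keys
    = PySem.Set.update d.keys (l.map (·.2)) := by
  induction l generalizing d with
  | nil => rfl
  | cons p l ih =>
      simp only [List.foldl_cons, List.map_cons, PySem.Set.update, ih]
      congr 1
      by_cases hc : d.contains p.2
      · have hmem : p.2 ∈ d.keys := (PySem.Dict.contains_iff_mem_keys d p.2).mp hc
        rw [if_pos hc, PySem.Dict.keys_modify, PySem.Dict.keys_insert_of_contains _ _ hc]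
        simp [PySem.Set.add, PySem.Set.contains, hmem]
      · have hc' : d.contains p.2 = false := by simpa using hc
        have hmem : p.2 ∉ d.keys := fun h => by
          rw [(PySem.Dict.contains_iff_mem_keys d p.2).mpr h] at hc'; simp at hc'
        rw [if_neg hc, PySem.Dict.keys_modify, PySem.Dict.insert_insert_self,
          PySem.Dict.keys_insert_of_not_contains _ _ hc']
        simp [PySem.Set.add, PySem.Set.contains, hmem]

-- B's dict over nodup fresh keys lists one item per target.
theorem B_items (ts : List String) (f : String → PySem.Set String) (hn : ts.Nodup) :
    (ts.foldl (fun (d : PySem.Dict String (PySem.Set String)) t => d.insert t (f t))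
      PySem.Dict.empty).items = ts.map (fun t => (t, f t)) := by
  simpa using PySem.Dict.items_foldl_insert_fresh ts (fun t => t) f PySem.Dict.empty
    (fun a _ => PySem.Dict.contains_empty a) (by simpa using hn)

-- ===== VERDICT (by name: the statement is the Claim_ definition above) =====
theorem build_reverse_index_py_spec : Claim_equal_build_reverse_index_py := by
  intro transitions _
  unfold Spec_build_reverse_index_py build_reverse_index_py build_reverse_index_py_alt
  have htargets :
      transitions.foldl (fun (acc : PySem.Set String) st => PySem.Set.add acc st.2) PySem.Set.empty
        = PySem.Set.ofList (transitions.map (·.2)) := by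
    rw [PySem.Set.ofList_eq_foldl, ← List.foldl_map]; rfl
  have hnodup : (PySem.Set.ofList (transitions.map (·.2))).Nodup :=
    PySem.Set.nodup_ofList (transitions.map (·.2))
  have hkeysA :
      PySem.Set.update (PySem.Dict.empty (κ := String) (ν := PySem.Set String)).keys
        (transitions.map (·.2)) = PySem.Set.ofList (transitions.map (·.2)) := by
    rw [PySem.Set.ofList_eq_foldl]; rfl
  have hnodupA :
      ((transitions.foldl
        (fun (d : PySem.Dict String (PySem.Set String)) st =>
          let d' := if d.contains st.2 then d else d.insert st.2 PySem.Set.empty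
          d'.modify st.2 PySem.Set.empty (fun s => PySem.Set.add s st.1))
        PySem.Dict.empty).keys).Nodup := by
    rw [A_keys, hkeysA]; exact hnodup
  rw [htargets, B_items _ _ hnodup,
    PySem.Dict.items_eq_map_keys _ hnodupA PySem.Set.empty, A_keys, hkeysA]
  refine List.map_congr_left (fun t _ => ?_)
  rw [A_getD]
  simp [PySem.Dict.getD_empty]
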